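-- pv_equiv track=rewrite | github.com/josephvalencia/bioseq2seq | bioseq2seq/bio/evaluator.py | kmer_overlap_scores
-- ===== SOURCE A (Python) =====
-- from collections import Counter, defaultdict
--
-- def kmer_overlap_scores(query,reference,k):
--
--     '''Calculates recall and precision of all words of length k.
--     query: query sequence (string or BioSeq)
--     reference: reference sequence (string or BioSeq)
--     k : size of word (int)
--     returns - recall,precision,f1 (tuple(float,float,float))'''
--
--     q_kmer_list = [query[i:i+k] for i in range(len(query)-k+1)]
--     r_kmer_list = [reference[i:i+k] for i in range(len(reference)-k+1)]
--
--     q_counts = Counter(q_kmer_list)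
--     r_counts = Counter(r_kmer_list)
--
--     tp = 0
--
--     for key,val in r_counts.items():
--
--         query_count = q_counts[key] if key in q_counts else 0
--         count = min(val,query_count)
--         tp += count
--
--     return tp, len(reference) - k+1, len(query) - k+1
-- ===== SOURCE B (Python) =====
-- def kmer_overlap_scores(query, reference, k):
--     n_q = len(query) - k + 1
--     n_r = len(reference) - k + 1
--     remaining = {}
--     for i in range(n_r):
--         kmer = reference[i:i+k]
--         remaining[kmer] = remaining.get(kmer, 0) + 1
--     tp = 0
--     for i in range(n_q):
--         kmer = query[i:i+k]
--         c = remaining.get(kmer, 0)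
--         if c > 0:
--             remaining[kmer] = c - 1
--             tp += 1
--     return tp, n_r, n_q
-- ===== Notes on version B (the rewrite author's own statement) =====
-- stated objective: alternative
-- what changed: Instead of building two Counters and summing min(ref_count, query_count) over the distinct reference k-mers, B keeps one plain dict of remaining reference k-mer counts and streams over every query position, consuming a reference count (tp += 1, count -= 1) whenever one is left.
import Mathlib
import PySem

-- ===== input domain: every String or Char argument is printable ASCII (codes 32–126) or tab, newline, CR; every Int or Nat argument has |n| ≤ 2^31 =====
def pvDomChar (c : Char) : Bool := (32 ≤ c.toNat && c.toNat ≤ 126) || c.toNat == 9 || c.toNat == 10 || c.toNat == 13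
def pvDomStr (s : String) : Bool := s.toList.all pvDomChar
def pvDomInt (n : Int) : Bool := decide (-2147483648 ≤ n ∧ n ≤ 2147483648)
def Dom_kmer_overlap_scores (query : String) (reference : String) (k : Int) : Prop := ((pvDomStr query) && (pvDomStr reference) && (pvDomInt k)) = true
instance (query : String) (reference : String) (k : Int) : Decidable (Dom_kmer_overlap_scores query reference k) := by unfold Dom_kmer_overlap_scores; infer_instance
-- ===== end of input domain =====

-- B replaces A's two Counters and sum of min(ref_count, query_count) over distinct reference
-- k-mers by a single remaining-count dict consumed while streaming over the query positions
-- (objective: alternative decomposition, same cost).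

-- ===== PORT A =====
def kmer_overlap_scores (query : String) (reference : String) (k : Int) : Int × Int × Int :=
  let q_kmer_list := (PySem.List.pyRange 0 (PySem.Str.len query - k + 1) 1).map
      (fun i => PySem.Str.slice query (some i) (some (i + k)))
  let r_kmer_list := (PySem.List.pyRange 0 (PySem.Str.len reference - k + 1) 1).map
      (fun i => PySem.Str.slice reference (some i) (some (i + k)))
  let q_counts := PySem.Dict.counter q_kmer_list
  let r_counts := PySem.Dict.counter r_kmer_list
  let tp := r_counts.items.foldl
      (fun tp kv =>
        let query_count := if q_counts.contains kv.1 then q_counts.getD kv.1 0 else 0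
        tp + min kv.2 query_count) 0
  (tp, PySem.Str.len reference - k + 1, PySem.Str.len query - k + 1)

-- ===== PORT B =====
def kmer_overlap_scores_alt (query : String) (reference : String) (k : Int) : Int × Int × Int :=
  let n_q := PySem.Str.len query - k + 1
  let n_r := PySem.Str.len reference - k + 1
  let remaining := (PySem.List.pyRange 0 n_r 1).foldl
      (fun d i =>
        let kmer := PySem.Str.slice reference (some i) (some (i + k))
        d.insert kmer (d.getD kmer 0 + 1)) PySem.Dict.empty
  let st := (PySem.List.pyRange 0 n_q 1).foldl
      (fun (st : PySem.Dict String Int × Int) i =>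
        let kmer := PySem.Str.slice query (some i) (some (i + k))
        let c := st.1.getD kmer 0
        if c > 0 then (st.1.insert kmer (c - 1), st.2 + 1) else st) (remaining, 0)
  (st.2, n_r, n_q)

-- ===== PRECONDITION & SPEC =====
def Spec_kmer_overlap_scores (query : String) (reference : String) (k : Int) (out : Int × Int × Int) : Prop := out = kmer_overlap_scores_alt query reference k
instance (query : String) (reference : String) (k : Int) (out : Int × Int × Int) : Decidable (Spec_kmer_overlap_scores query reference k out) := by unfold Spec_kmer_overlap_scores; infer_instance

-- ===== CLAIM (what is proved, stated in full; the proofs are below) =====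
def Claim_equal_kmer_overlap_scores : Prop := ∀ (query : String) (reference : String) (k : Int), Dom_kmer_overlap_scores query reference k → Spec_kmer_overlap_scores query reference k (kmer_overlap_scores query reference k)

-- ===== LEMMAS AND PROOFS =====

-- Greedy consumption count of B's query loop, abstracted to a plain remaining-count function.
def pvGreedy (qs : List String) (μ : String → Nat) : Nat :=
  match qs with
  | [] => 0
  | x :: t => if 0 < μ x then 1 + pvGreedy t (Function.update μ x (μ x - 1)) else pvGreedy t μ

-- Greedy consumption equals the sum of min(query count, remaining count) over any finset
-- containing all query k-mers.
lemma pvGreedy_eq_sum (S : Finset String) (qs : List String) (μ : String → Nat)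
    (h : ∀ x ∈ qs, x ∈ S) :
    pvGreedy qs μ = ∑ x ∈ S, min (qs.count x) (μ x) := by
  induction qs generalizing μ with
  | nil => simp [pvGreedy]
  | cons x t ih =>
    have hxS : x ∈ S := h x (List.mem_cons_self)
    have ht : ∀ y ∈ t, y ∈ S := fun y hy => h y (List.mem_cons_of_mem _ hy)
    by_cases hx : 0 < μ x
    · rw [pvGreedy, if_pos hx, ih _ ht,
        ← Finset.add_sum_erase S (fun y => min ((x :: t).count y) (μ y)) hxS,
        ← Finset.add_sum_erase S
          (fun y => min (t.count y) (Function.update μ x (μ x - 1) y)) hxS]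
      have h1 : min ((x :: t).count x) (μ x)
          = 1 + min (t.count x) (Function.update μ x (μ x - 1) x) := by
        simp only [List.count_cons_self, Function.update_self]
        omega
      have h2 : ∀ y ∈ S.erase x, min ((x :: t).count y) (μ y)
          = min (t.count y) (Function.update μ x (μ x - 1) y) := by
        intro y hy
        have hyx : y ≠ x := Finset.ne_of_mem_erase hy
        simp only [List.count_cons, beq_iff_eq]
        rw [if_neg (fun hxy : x = y => hyx hxy.symm), Nat.add_zero, Function.update_of_ne hyx]
      rw [h1, Finset.sum_congr rfl h2]
      ring
    · rw [pvGreedy, if_neg hx, ih _ ht]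
      refine (Finset.sum_congr rfl ?_).symm
      intro y _
      by_cases hyx : y = x
      · subst hyx
        have h0 : μ y = 0 := by omega
        simp [h0]
      · simp only [List.count_cons, beq_iff_eq]
        rw [if_neg (fun hxy : x = y => hyx hxy.symm), Nat.add_zero]

-- B's query loop computes tp via pvGreedy on the dict's remaining counts.
lemma loopB_eq (qs : List String) :
    ∀ (d : PySem.Dict String Int) (t : Int),
    (List.foldl (fun (st : PySem.Dict String Int × Int) kmer =>
        if st.1.getD kmer 0 > 0 then (st.1.insert kmer (st.1.getD kmer 0 - 1), st.2 + 1) else st)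
      (d, t) qs).2
      = t + (pvGreedy qs (fun x => (d.getD x 0).toNat) : Int) := by
  induction qs with
  | nil => intro d t; simp [pvGreedy]
  | cons x rest ih =>
    intro d t
    simp only [List.foldl_cons]
    by_cases hc : d.getD x 0 > 0
    · rw [if_pos hc, ih]
      have hμ : (fun y => ((d.insert x (d.getD x 0 - 1)).getD y 0).toNat)
          = Function.update (fun y => (d.getD y 0).toNat) x ((d.getD x 0).toNat - 1) := by
        funext y
        by_cases hyx : y = x
        · subst hyx
          rw [PySem.Dict.getD_insert, if_pos rfl, Function.update_self]
          omega
        · rw [PySem.Dict.getD_insert, if_neg hyx, Function.update_of_ne hyx]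
      rw [hμ, pvGreedy, if_pos (by omega)]
      push_cast
      ring
    · rw [if_neg hc, ih, pvGreedy, if_neg (by omega)]

-- A's items loop computes the sum of min(ref count, query count) over the distinct ref k-mers.
lemma tpA_eq_sum (qs rs : List String) :
    (PySem.Dict.counter rs).items.foldl
      (fun tp kv =>
        tp + min kv.2 (if (PySem.Dict.counter qs).contains kv.1
          then (PySem.Dict.counter qs).getD kv.1 0 else 0)) 0
    = ∑ x ∈ rs.toFinset, min (rs.count x : Int) (qs.count x : Int) := by
  rw [PySem.Dict.items_counter, List.foldl_map]
  simp only [PySem.Dict.contains_counter, PySem.Dict.getD_counter]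
  rw [PySem.List.foldl_add
    (g := fun kmer => min (rs.count kmer : Int)
      (if qs.contains kmer then (qs.count kmer : Int) else 0)), zero_add]
  have hg : ∀ kmer, min (rs.count kmer : Int)
      (if qs.contains kmer then (qs.count kmer : Int) else 0)
      = min (rs.count kmer : Int) (qs.count kmer : Int) := by
    intro kmer
    by_cases hm : qs.contains kmer
    · rw [if_pos hm]
    · rw [if_neg hm]
      have h0 : qs.count kmer = 0 := by
        rw [List.count_eq_zero]
        simpa using hm
      simp [h0]
  simp only [hg]
  rw [← List.sum_toFinset _ (PySem.Set.nodup_ofList rs)]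
  refine Finset.sum_congr ?_ (fun _ _ => rfl)
  ext y
  simp [PySem.Set.mem_ofList]

-- ===== VERDICT (by name: the statement is the Claim_ definition above) =====
theorem kmer_overlap_scores_spec : Claim_equal_kmer_overlap_scores := by
  intro query reference k _
  unfold Spec_kmer_overlap_scores
  simp only [kmer_overlap_scores, kmer_overlap_scores_alt]
  set qs := (PySem.List.pyRange 0 (PySem.Str.len query - k + 1) 1).map
      (fun i => PySem.Str.slice query (some i) (some (i + k))) with hqs
  set rs := (PySem.List.pyRange 0 (PySem.Str.len reference - k + 1) 1).map
      (fun i => PySem.Str.slice reference (some i) (some (i + k))) with hrs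
  rw [← List.foldl_map
        (f := fun i => PySem.Str.slice reference (some i) (some (i + k)))
        (g := fun (d : PySem.Dict String Int) kmer => d.insert kmer (d.getD kmer 0 + 1))
        (l := PySem.List.pyRange 0 (PySem.Str.len reference - k + 1) 1)
        (init := PySem.Dict.empty),
      ← List.foldl_map
        (f := fun i => PySem.Str.slice query (some i) (some (i + k)))
        (g := fun (st : PySem.Dict String Int × Int) kmer =>
          if st.1.getD kmer 0 > 0 then (st.1.insert kmer (st.1.getD kmer 0 - 1), st.2 + 1) else st)
        (l := PySem.List.pyRange 0 (PySem.Str.len query - k + 1) 1),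
      ← hqs, ← hrs, PySem.Dict.foldl_insert_getD_add_one_eq_counter]
  rw [Prod.mk.injEq, Prod.mk.injEq]
  refine ⟨?_, rfl, rfl⟩
  rw [tpA_eq_sum qs rs, loopB_eq qs (PySem.Dict.counter rs) 0, zero_add]
  simp only [PySem.Dict.getD_counter, Int.toNat_natCast]
  rw [pvGreedy_eq_sum ((qs ++ rs).toFinset) qs (fun x => rs.count x)
    (by intro x hx; rw [List.mem_toFinset]; exact List.mem_append_left _ hx)]
  have hsub : rs.toFinset ⊆ (qs ++ rs).toFinset := by
    intro x hx
    rw [List.toFinset_append, Finset.mem_union]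
    exact Or.inr hx
  rw [Finset.sum_subset hsub
    (by
      intro x _ hxr
      have h0 : (rs.count x : Int) = 0 := by
        rw [Nat.cast_eq_zero, List.count_eq_zero, ← List.mem_toFinset]
        exact hxr
      rw [h0]
      exact min_eq_left (by positivity))]
  push_cast
  refine Finset.sum_congr rfl (fun x _ => ?_)
  rw [min_comm]
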